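-- pv_equiv track=rewrite | github.com/ZhanGHanG9991/nl2plsql_plfactory | experiments/utils/plsql_util.py | _find_block_comment_end
-- ===== SOURCE A (Python) =====
-- def _find_block_comment_end(s: str, start: int) -> int:
--     '''
--     找到块注释的结束位置，支持嵌套 (PostgreSQL 特性)。
--     '''
--     n = len(s)
--     i = start + 2
--     depth = 1
--
--     while i < n:
--         if i + 1 < n and s[i:i+2] == '/*':
--             depth += 1
--             i += 2
--         elif i + 1 < n and s[i:i+2] == '*/':
--             depth -= 1
--             i += 2
--             if depth == 0:
--                 return i
--         else:
--             i += 1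
--
--     return n
-- ===== SOURCE B (Python) =====
-- def _find_block_comment_end(s: str, start: int) -> int:
--     # Leap between delimiters with str.find instead of inspecting every index.
--     n = len(s)
--     i = start + 2
--     depth = 1
--     while True:
--         a = s.find('/*', i)
--         b = s.find('*/', i)
--         if b == -1:
--             return n
--         if a != -1 and a < b:
--             depth += 1
--             i = a + 2
--         else:
--             depth -= 1
--             i = b + 2
--             if depth == 0:
--                 return i
-- ===== Notes on version B (the rewrite author's own statement) =====
-- stated objective: faster
-- what changed: Instead of scanning character by character and slicing s[i:i+2] at every index, B leaps directly between delimiters with s.find('/*', i) and s.find('*/', i), advancing past the nearest one and tracking nesting depth.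
-- outside the precondition, e.g. on _find_block_comment_end('a*/bc', -5): A returns 3, B returns 5
import Mathlib
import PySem

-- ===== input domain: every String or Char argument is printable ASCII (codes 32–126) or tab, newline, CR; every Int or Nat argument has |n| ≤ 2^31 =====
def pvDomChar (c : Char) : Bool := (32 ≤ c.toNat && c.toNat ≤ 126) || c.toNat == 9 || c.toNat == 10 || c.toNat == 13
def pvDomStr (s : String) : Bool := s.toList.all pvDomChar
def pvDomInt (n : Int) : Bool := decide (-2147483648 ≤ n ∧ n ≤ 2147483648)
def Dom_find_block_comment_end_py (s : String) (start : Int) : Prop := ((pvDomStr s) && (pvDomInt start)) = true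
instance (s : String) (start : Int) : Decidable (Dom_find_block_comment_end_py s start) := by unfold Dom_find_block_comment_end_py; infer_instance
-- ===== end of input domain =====

-- B leaps between delimiters with str.find instead of inspecting s[i:i+2] at every index (same depth counting).

-- ===== PORT A =====
-- A's while-loop: i, depth as in the Python; the conditions are s[i:i+2] == '/*' and s[i:i+2] == '*/'.
-- fuel is only a totality guard: each iteration raises i by ≥ 1 and the loop exits once l.length ≤ i,
-- so any fuel with l.length ≤ i + fuel gives the loop's exact value (the fuel-0 fallback is the exit value).
def pvLoopA (l : List Char) : Nat → Int → Int → Int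
  | 0, _, _ => (l.length : Int)
  | fuel + 1, i, depth =>
    if i < (l.length : Int) then
      if i + 1 < (l.length : Int) ∧ PySem.List.slice l (some i) (some (i + 2)) = ['/', '*'] then
        pvLoopA l fuel (i + 2) (depth + 1)
      else if i + 1 < (l.length : Int) ∧ PySem.List.slice l (some i) (some (i + 2)) = ['*', '/'] then
        if depth - 1 = 0 then i + 2 else pvLoopA l fuel (i + 2) (depth - 1)
      else
        pvLoopA l fuel (i + 1) depth
    else (l.length : Int)

def find_block_comment_end_py (s : String) (start : Int) : Int :=
  pvLoopA s.toList ((s.toList.length : Int) - (start + 2)).toNat (start + 2) 1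

-- ===== PORT B =====
-- B's while-loop: a = s.find('/*', i), b = s.find('*/', i); fuel again only a totality guard
-- (each iteration raises i by ≥ 1, and once l.length ≤ i the b = -1 branch returns len = the fuel-0 fallback).
def pvLoopB (l : List Char) : Nat → Int → Int → Int
  | 0, _, _ => (l.length : Int)
  | fuel + 1, i, depth =>
    let a := PySem.Chars.findFrom l ['/', '*'] i none
    let b := PySem.Chars.findFrom l ['*', '/'] i none
    if b = -1 then (l.length : Int)
    else if a ≠ -1 ∧ a < b then
      pvLoopB l fuel (a + 2) (depth + 1)
    else if depth - 1 = 0 then b + 2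
    else pvLoopB l fuel (b + 2) (depth - 1)

def find_block_comment_end_py_alt (s : String) (start : Int) : Int :=
  pvLoopB s.toList ((s.toList.length : Int) + 2 - (start + 2)).toNat (start + 2) 1

-- ===== PRECONDITION & SPEC =====
-- Pre_ excludes negative start, which lies outside the function's contract (start is the index of the
-- '/*' opener): there A's slice s[i:i+2] wraps Python's negative indices and rescans the string.
def Pre_find_block_comment_end_py (s : String) (start : Int) : Prop := 0 ≤ start
instance (s : String) (start : Int) : Decidable (Pre_find_block_comment_end_py s start) := by
  unfold Pre_find_block_comment_end_py; infer_instance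

def pvWitness_find_block_comment_end_py : String × Int := ("/*a/*b*/c*/d", 0)

def Spec_find_block_comment_end_py (s : String) (start : Int) (out : Int) : Prop :=
  out = find_block_comment_end_py_alt s start
instance (s : String) (start : Int) (out : Int) : Decidable (Spec_find_block_comment_end_py s start out) := by
  unfold Spec_find_block_comment_end_py; infer_instance

-- ===== CLAIM (what is proved, stated in full; the proofs are below) =====
def Claim_equal_find_block_comment_end_py : Prop :=
  ∀ (s : String) (start : Int), Dom_find_block_comment_end_py s start →
    Pre_find_block_comment_end_py s start →
    Spec_find_block_comment_end_py s start (find_block_comment_end_py s start)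

-- ===== LEMMAS AND PROOFS =====

-- a two-character delimiter is a prefix of l.drop k  iff  the slice l[k:k+2] equals it
theorem pvPrefix_iff_slice (l : List Char) (c₁ c₂ : Char) (k : Nat) :
    [c₁, c₂] <+: l.drop k ↔ PySem.List.slice l (some (k : Int)) (some ((k : Int) + 2)) = [c₁, c₂] := by
  have h2 : ((k : Int) + 2) = ((k : Int) + ((2 : Nat) : Int)) := by norm_num
  rw [h2, PySem.List.slice_natCast_add]
  rw [List.prefix_iff_eq_take]
  simp only [List.length_cons, List.length_nil]
  exact ⟨fun h => h.symm, fun h => h.symm⟩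

-- the prefix condition forces k + 2 ≤ length
theorem pvSlice_len (l : List Char) (c₁ c₂ : Char) (k : Nat)
    (h : [c₁, c₂] <+: l.drop k) : k + 2 ≤ l.length := by
  have := h.length_le
  simp only [List.length_cons, List.length_nil, List.length_drop] at this
  omega

-- a start past the end gives -1
theorem pvFindFrom_gt_len (l sub : List Char) (k : Nat) (hk : l.length < k) :
    PySem.Chars.findFrom l sub (k : Int) none = -1 := by
  simp only [PySem.Chars.findFrom]
  split_ifs <;> omega

-- infix of a drop ↔ prefix at some later position
theorem pvInfix_iff (l sub : List Char) (k : Nat) :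
    sub <:+: l.drop k ↔ ∃ m : Nat, k ≤ m ∧ sub <+: l.drop m := by
  constructor
  · intro h
    have h1 : PySem.Chars.isIn sub (l.drop k) = true := (PySem.Chars.isIn_iff_infix _ _).2 h
    obtain ⟨j, hj⟩ := (PySem.Chars.exists_prefix_drop_iff_isIn sub (l.drop k)).2 h1
    rw [List.drop_drop] at hj
    exact ⟨k + j, by omega, hj⟩
  · rintro ⟨m, hm, h⟩
    have h2 : sub <+: (l.drop k).drop (m - k) := by
      rw [List.drop_drop, Nat.add_sub_cancel' hm]; exact h
    have h3 : (l.drop k).drop (m - k) <:+ l.drop k := List.drop_suffix _ _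
    exact h2.isInfix.trans h3.isInfix

-- find characterization: -1 iff no match at any position ≥ k
theorem pvFindFrom_eq_neg_one_iff (l sub : List Char) (k : Nat) (hsub : sub ≠ []) :
    PySem.Chars.findFrom l sub (k : Int) none = -1 ↔ ∀ m : Nat, k ≤ m → ¬ sub <+: l.drop m := by
  by_cases hk : k ≤ l.length
  · rw [PySem.Chars.findFrom_natCast_eq_neg_one_iff l sub k hk, pvInfix_iff]
    constructor
    · intro h m hm hp; exact h ⟨m, hm, hp⟩
    · rintro h ⟨m, hm, hp⟩; exact h m hm hp
  · rw [pvFindFrom_gt_len l sub k (by omega)]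
    simp only [true_iff]
    intro m hm hp
    have : l.drop m = [] := List.drop_eq_nil_of_le (by omega)
    rw [this, List.prefix_nil] at hp
    exact hsub hp

-- a successful find ≥ k lands on the first match at or after k
theorem pvFindFrom_spec (l sub : List Char) (k : Nat)
    (h : PySem.Chars.findFrom l sub (k : Int) none ≠ -1) :
    (k : Int) ≤ PySem.Chars.findFrom l sub (k : Int) none ∧
    sub <+: l.drop (PySem.Chars.findFrom l sub (k : Int) none).toNat ∧
    ∀ i : Nat, k ≤ i → i < (PySem.Chars.findFrom l sub (k : Int) none).toNat → ¬ sub <+: l.drop i := by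
  by_cases hk : k ≤ l.length
  · exact PySem.Chars.findFrom_natCast_spec l sub k hk h
  · exact absurd (pvFindFrom_gt_len l sub k (by omega)) h

-- find at a matching position returns it
theorem pvFindFrom_self (l sub : List Char) (k : Nat) (hsub : sub ≠ [])
    (h : sub <+: l.drop k) : PySem.Chars.findFrom l sub (k : Int) none = (k : Int) := by
  have hne : PySem.Chars.findFrom l sub (k : Int) none ≠ -1 :=
    fun e => ((pvFindFrom_eq_neg_one_iff l sub k hsub).1 e) k le_rfl h
  obtain ⟨h1, h2, h3⟩ := pvFindFrom_spec l sub k hne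
  by_cases hlt : k < (PySem.Chars.findFrom l sub (k : Int) none).toNat
  · exact absurd h (h3 k (le_refl _) hlt)
  · omega

-- find steps over a non-matching position
theorem pvFindFrom_step (l sub : List Char) (k : Nat) (hsub : sub ≠ [])
    (h : ¬ sub <+: l.drop k) :
    PySem.Chars.findFrom l sub (k : Int) none = PySem.Chars.findFrom l sub ((k : Int) + 1) none := by
  have hcast : ((k : Int) + 1) = ((k + 1 : Nat) : Int) := by push_cast; ring
  rw [hcast]
  by_cases hF : PySem.Chars.findFrom l sub (k : Int) none = -1
  · rw [hF]
    have hall := (pvFindFrom_eq_neg_one_iff l sub k hsub).1 hF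
    exact ((pvFindFrom_eq_neg_one_iff l sub (k+1) hsub).2 (fun m hm => hall m (by omega))).symm
  · obtain ⟨h1, h2, h3⟩ := pvFindFrom_spec l sub k hF
    set F := PySem.Chars.findFrom l sub (k : Int) none with hFdef
    have hFk : k + 1 ≤ F.toNat := by
      rcases Nat.lt_or_ge k F.toNat with hlt | hge
      · omega
      · have : F.toNat = k := by omega
        rw [this] at h2; exact absurd h2 h
    have hne' : PySem.Chars.findFrom l sub ((k+1 : Nat) : Int) none ≠ -1 :=
      fun e => ((pvFindFrom_eq_neg_one_iff l sub (k+1) hsub).1 e) F.toNat hFk h2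
    obtain ⟨g1, g2, g3⟩ := pvFindFrom_spec l sub (k+1) hne'
    set G := PySem.Chars.findFrom l sub ((k+1 : Nat) : Int) none with hGdef
    have hGF : G.toNat ≤ F.toNat := by
      by_contra hc
      exact g3 F.toNat hFk (by omega) h2
    have hFG : F.toNat ≤ G.toNat := by
      by_contra hc
      exact h3 G.toNat (by omega) (by omega) g2
    omega

-- '/*' and '*/' cannot both start at the same position
theorem pvNotBoth (l : List Char) (i : Nat) (hO : ['/', '*'] <+: l.drop i)
    (hC : ['*', '/'] <+: l.drop i) : False := by
  obtain ⟨t1, ht1⟩ := hO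
  obtain ⟨t2, ht2⟩ := hC
  rw [← ht1] at ht2
  simp at ht2

-- past the end, A's loop returns len with any fuel
theorem pvLoopA_base (l : List Char) (fuel : Nat) (i : Nat) (d : Int) (hle : l.length ≤ i) :
    pvLoopA l fuel (i : Int) d = (l.length : Int) := by
  cases fuel with
  | zero => rfl
  | succ f => rw [pvLoopA, if_neg (by exact_mod_cast by omega)]

-- past the end, B's loop returns len with any fuel
theorem pvLoopB_base (l : List Char) (fuel : Nat) (i : Nat) (d : Int) (hle : l.length ≤ i) :
    pvLoopB l fuel (i : Int) d = (l.length : Int) := by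
  cases fuel with
  | zero => rfl
  | succ f =>
    have hb : PySem.Chars.findFrom l ['*', '/'] (i : Int) none = -1 := by
      rw [pvFindFrom_eq_neg_one_iff l _ i (by simp)]
      intro m hm hp
      have hd : l.drop m = [] := List.drop_eq_nil_of_le (by omega)
      rw [hd, List.prefix_nil] at hp
      simp at hp
    rw [pvLoopB]
    simp only [hb]
    simp

-- if no '*/' occurs at or after i0, A's loop runs off the end and returns len
theorem pvLoopA_noClose (l : List Char) (i0 : Nat)
    (H : ∀ m : Nat, i0 ≤ m → ¬ ['*', '/'] <+: l.drop m) :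
    ∀ (fuel i : Nat) (d : Int), l.length ≤ i + fuel → i0 ≤ i → pvLoopA l fuel (i : Int) d = (l.length : Int) := by
  intro fuel
  induction fuel with
  | zero =>
    intro i d hle hi
    exact pvLoopA_base l 0 i d (by omega)
  | succ f ih =>
    intro i d hle hi
    rw [pvLoopA]
    by_cases hc : (i : Int) < (l.length : Int)
    · rw [if_pos hc]
      by_cases hO : (i : Int) + 1 < (l.length : Int) ∧ PySem.List.slice l (some (i : Int)) (some ((i : Int) + 2)) = ['/', '*']
      · rw [if_pos hO]
        have e2 : (i : Int) + 2 = ((i + 2 : Nat) : Int) := by push_cast; ring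
        rw [e2]
        exact ih (i + 2) (d + 1) (by omega) (by omega)
      · rw [if_neg hO]
        have hC : ¬ ((i : Int) + 1 < (l.length : Int) ∧ PySem.List.slice l (some (i : Int)) (some ((i : Int) + 2)) = ['*', '/']) := by
          rintro ⟨-, h2⟩
          exact H i hi ((pvPrefix_iff_slice l '*' '/' i).2 h2)
        rw [if_neg hC]
        have e1 : (i : Int) + 1 = ((i + 1 : Nat) : Int) := by push_cast; ring
        rw [e1]
        exact ih (i + 1) d (by omega) (by omega)
    · rw [if_neg hc]

-- main invariant: with sufficient fuel on both sides the two loops agree from any nonnegative index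
theorem pvLoop_eq (l : List Char) : ∀ (fa : Nat) (i : Nat) (fb : Nat) (d : Int),
    l.length ≤ i + fa → l.length ≤ i + fb →
    pvLoopA l fa (i : Int) d = pvLoopB l fb (i : Int) d := by
  intro fa
  induction fa with
  | zero =>
    intro i fb d hlea hleb
    rw [pvLoopA_base l 0 i d (by omega), pvLoopB_base l fb i d (by omega)]
  | succ f ih =>
    intro i fb d hlea hleb
    by_cases hc : i < l.length
    · cases fb with
      | zero => omega
      | succ g =>
        have hcI : (i : Int) < (l.length : Int) := by exact_mod_cast hc
        have e2 : (i : Int) + 2 = ((i + 2 : Nat) : Int) := by push_cast; ring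
        have e1 : (i : Int) + 1 = ((i + 1 : Nat) : Int) := by push_cast; ring
        by_cases hO : ['/', '*'] <+: l.drop i
        · have hnC : ¬ ['*', '/'] <+: l.drop i := fun hC => pvNotBoth l i hO hC
          have hlen := pvSlice_len l '/' '*' i hO
          have ha : PySem.Chars.findFrom l ['/', '*'] (i : Int) none = (i : Int) :=
            pvFindFrom_self l _ i (by simp) hO
          rw [pvLoopA, if_pos hcI,
            if_pos ⟨by exact_mod_cast by omega, (pvPrefix_iff_slice l '/' '*' i).1 hO⟩]
          rw [pvLoopB]
          by_cases hb : PySem.Chars.findFrom l ['*', '/'] (i : Int) none = -1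
          · rw [if_pos hb]
            have H : ∀ m : Nat, i ≤ m → ¬ ['*', '/'] <+: l.drop m :=
              (pvFindFrom_eq_neg_one_iff l _ i (by simp)).1 hb
            rw [e2]
            exact pvLoopA_noClose l i H f (i + 2) (d + 1) (by omega) (by omega)
          · rw [if_neg hb]
            obtain ⟨hb1, hb2, -⟩ := pvFindFrom_spec l _ i hb
            have hbne : PySem.Chars.findFrom l ['*', '/'] (i : Int) none ≠ (i : Int) := by
              intro e
              apply hnC
              have : (PySem.Chars.findFrom l ['*', '/'] (i : Int) none).toNat = i := by omega
              rwa [this] at hb2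
            rw [if_pos ⟨by rw [ha]; omega, by rw [ha]; omega⟩]
            rw [ha, e2]
            exact ih (i + 2) g (d + 1) (by omega) (by omega)
        · by_cases hC : ['*', '/'] <+: l.drop i
          · have hlen := pvSlice_len l '*' '/' i hC
            have hb : PySem.Chars.findFrom l ['*', '/'] (i : Int) none = (i : Int) :=
              pvFindFrom_self l _ i (by simp) hC
            rw [pvLoopA, if_pos hcI,
              if_neg (fun h => hO ((pvPrefix_iff_slice l '/' '*' i).2 h.2)),
              if_pos ⟨by exact_mod_cast by omega, (pvPrefix_iff_slice l '*' '/' i).1 hC⟩]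
            rw [pvLoopB]
            have hbm1 : ¬ (PySem.Chars.findFrom l ['*', '/'] (i : Int) none = -1) := by
              rw [hb]; omega
            rw [if_neg hbm1]
            have hna : ¬ (PySem.Chars.findFrom l ['/', '*'] (i : Int) none ≠ -1 ∧
                PySem.Chars.findFrom l ['/', '*'] (i : Int) none < PySem.Chars.findFrom l ['*', '/'] (i : Int) none) := by
              rintro ⟨ha1, ha2⟩
              obtain ⟨g1, g2, -⟩ := pvFindFrom_spec l _ i ha1
              rw [hb] at ha2
              have : (PySem.Chars.findFrom l ['/', '*'] (i : Int) none).toNat = i := by omega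
              rw [this] at g2
              exact hO g2
            rw [if_neg hna, hb]
            by_cases hd1 : d - 1 = 0
            · rw [if_pos hd1, if_pos hd1]
            · rw [if_neg hd1, if_neg hd1, e2]
              exact ih (i + 2) g (d - 1) (by omega) (by omega)
          · have ea : PySem.Chars.findFrom l ['/', '*'] (i : Int) none =
                PySem.Chars.findFrom l ['/', '*'] ((i + 1 : Nat) : Int) none := by
              rw [← e1]
              exact pvFindFrom_step l _ i (by simp) hO
            have eb : PySem.Chars.findFrom l ['*', '/'] (i : Int) none =
                PySem.Chars.findFrom l ['*', '/'] ((i + 1 : Nat) : Int) none := by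
              rw [← e1]
              exact pvFindFrom_step l _ i (by simp) hC
            have hBstep : pvLoopB l (g + 1) (i : Int) d = pvLoopB l (g + 1) ((i + 1 : Nat) : Int) d := by
              conv_lhs => rw [pvLoopB]
              conv_rhs => rw [pvLoopB]
              rw [ea, eb]
            rw [pvLoopA, if_pos hcI,
              if_neg (fun h => hO ((pvPrefix_iff_slice l '/' '*' i).2 h.2)),
              if_neg (fun h => hC ((pvPrefix_iff_slice l '*' '/' i).2 h.2)), e1,
              ih (i + 1) (g + 1) d (by omega) (by omega), hBstep]
    · rw [pvLoopA_base l (f + 1) i d (by omega), pvLoopB_base l fb i d (by omega)]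

-- ===== VERDICT (by name: the statement is the Claim_ definition above) =====
theorem find_block_comment_end_py_spec : Claim_equal_find_block_comment_end_py := by
  intro s start _hdom hpre
  unfold Spec_find_block_comment_end_py find_block_comment_end_py find_block_comment_end_py_alt
  have h0 : (0 : Int) ≤ start := hpre
  have h2 : (0 : Int) ≤ start + 2 := by omega
  have h := pvLoop_eq s.toList ((s.toList.length : Int) - (start + 2)).toNat (start + 2).toNat
    ((s.toList.length : Int) + 2 - (start + 2)).toNat 1 (by omega) (by omega)
  rwa [Int.toNat_of_nonneg h2] at h
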